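-- pv_equiv track=rewrite | github.com/allc/Advent-of-Code-2019 | day4part1.py | is_non_increasing
-- ===== SOURCE A (Python) =====
-- def is_non_increasing(n):
--     n = str(n)
--     last = n[0]
--     for c in n[1:]:
--         if c < last:
--             return False
--         last = c
--     return True
-- ===== SOURCE B (Python) =====
-- def is_non_increasing(n):
--     s = str(n)
--     return s == ''.join(sorted(s))
-- ===== Notes on version B (the rewrite author's own statement) =====
-- stated objective: idiomatic
-- what changed: Replaces the explicit compare-with-previous scan by a sort-then-compare one-liner: str(n) equals ''.join(sorted(str(n))) exactly when the digits are non-decreasing.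
import Mathlib
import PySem

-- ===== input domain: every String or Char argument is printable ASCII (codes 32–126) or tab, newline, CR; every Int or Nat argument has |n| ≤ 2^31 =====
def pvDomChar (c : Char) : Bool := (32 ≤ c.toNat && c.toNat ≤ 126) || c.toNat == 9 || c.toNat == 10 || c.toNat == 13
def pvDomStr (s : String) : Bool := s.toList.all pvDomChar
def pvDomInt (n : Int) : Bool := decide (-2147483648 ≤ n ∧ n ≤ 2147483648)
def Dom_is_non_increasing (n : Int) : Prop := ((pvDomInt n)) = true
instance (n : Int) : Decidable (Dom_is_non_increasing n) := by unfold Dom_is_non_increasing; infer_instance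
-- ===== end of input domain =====

-- B replaces A's compare-with-previous scan by the idiomatic sort-then-compare one-liner
-- (s == ''.join(sorted(s))); return value only, no side effects.

-- ===== PORT A =====
-- the for-loop of A: carries 'last', returns False as soon as c < last
def iniLoop (last : Char) : List Char → Bool
  | [] => true
  | c :: cs => if c < last then false else iniLoop c cs

def is_non_increasing (n : Int) : Bool :=
  match (PySem.Int.toStr n).toList with
  | [] => true   -- unreachable: str(n) of an int is never empty (A's n[0] would raise there)
  | last :: rest => iniLoop last rest

-- ===== PORT B =====
def is_non_increasing_alt (n : Int) : Bool :=
  let s := (PySem.Int.toStr n).toList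
  decide (s = PySem.List.sorted s (fun c => c) false)

-- ===== PRECONDITION & SPEC =====
def Spec_is_non_increasing (n : Int) (out : Bool) : Prop := out = is_non_increasing_alt n
instance (n : Int) (out : Bool) : Decidable (Spec_is_non_increasing n out) := by unfold Spec_is_non_increasing; infer_instance

-- ===== CLAIM (what is proved, stated in full; the proofs are below) =====
def Claim_equal_is_non_increasing : Prop := ∀ (n : Int), Dom_is_non_increasing n → Spec_is_non_increasing n (is_non_increasing n)

-- ===== LEMMAS AND PROOFS =====

theorem iniLoop_eq_chain (last : Char) (cs : List Char) :
    iniLoop last cs = true ↔ List.IsChain (· ≤ ·) (last :: cs) := by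
  induction cs generalizing last with
  | nil => simp [iniLoop]
  | cons c cs ih =>
    simp only [iniLoop, List.isChain_cons_cons]
    split_ifs with h
    · simp [not_le.mpr h]
    · simp [not_lt.mp h, ih]

theorem iniLoop_eq_sorted (last : Char) (cs : List Char) :
    iniLoop last cs =
      decide (last :: cs = PySem.List.sorted (last :: cs) (fun c => c) false) := by
  rcases h : iniLoop last cs with _ | _
  · rw [eq_comm, decide_eq_false_iff_not]
    intro hs
    have hp : (last :: cs).Pairwise (fun a b : Char => a ≤ b) := by
      have := PySem.List.sorted_pairwise (xs := last :: cs) (key := fun c : Char => c)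
      rw [← hs] at this; exact this
    have : iniLoop last cs = true := by
      rw [iniLoop_eq_chain, List.isChain_iff_pairwise]
      exact hp
    simp [h] at this
  · rw [eq_comm, decide_eq_true_iff]
    have hp : (last :: cs).Pairwise (fun a b : Char => a ≤ b) :=
      List.isChain_iff_pairwise.mp ((iniLoop_eq_chain last cs).mp h)
    exact (PySem.List.sorted_eq_self_of_pairwise _ (fun c : Char => c) hp).symm

-- ===== VERDICT (by name: the statement is the Claim_ definition above) =====
theorem is_non_increasing_spec : Claim_equal_is_non_increasing := by
  intro n _
  unfold Spec_is_non_increasing is_non_increasing is_non_increasing_alt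
  rcases h : (PySem.Int.toStr n).toList with _ | ⟨last, rest⟩
  · simp [PySem.List.sorted]
  · exact iniLoop_eq_sorted last rest
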